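-- pv_equiv track=rewrite | github.com/Traffic-Alpha/single-tsc-baselines | utils/statistic_state_tools.py | build_lane_phase_binding_mapping
-- ===== SOURCE A (Python) =====
-- from typing import List, Tuple, Dict, Any
--
-- def build_lane_phase_binding_mapping(
--     movement_lanes: Dict[str, List[str]],
--     phase2movements: Dict[int, List[str]]
-- ) -> Dict[str, List[int]]:
--     """构建 lane 到相位绑定的映射
--
--     根据 phase2movements 中的信息，判断每条车道属于哪些相位：
--     - Incoming Lane: Multi-hot 编码，如果属于某个相位则对应位为 1
--     - Outgoing Lane: 全 0 (不受灯控)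
--
--     Args:
--         movement_lanes: movement 到 lane 列表的映射
--             例如 {'-E1--r': ['-E1_0'], '-E1--s': ['-E1_1'], '-E1--l': ['-E1_2'], ...}
--         phase2movements: 相位到 movement 列表的映射
--             例如 {0: ['-E3--s', '-E2--s'], 1: ['-E3--l', '-E2--l'], ...}
--
--     Returns:
--         lane_to_phases: lane 到相位绑定的映射
--             例如 {'-E1_0': [1, 0, 1, 0], '-E1_1': [0, 1, 0, 0], ...}
--     """
--     num_phases = len(phase2movements)
--     lane_to_phases = {}
--
--     # 首先构建 movement 到 phases 的映射
--     movement_to_phases = {}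
--     for phase_id, movements in phase2movements.items():
--         for movement_id in movements:
--             if movement_id not in movement_to_phases:
--                 movement_to_phases[movement_id] = []
--             movement_to_phases[movement_id].append(phase_id)
--
--     # 然后为每个 lane 构建相位绑定
--     for movement_id, lanes in movement_lanes.items():
--         # 初始化相位绑定（全 0）
--         phase_binding = [0] * num_phases
--
--         # 如果该 movement 属于某些相位，设置对应位为 1
--         if movement_id in movement_to_phases:
--             for phase_id in movement_to_phases[movement_id]:
--                 phase_binding[phase_id] = 1
--
--         # 为该 movement 的所有 lane 设置相同的相位绑定
--         for lane_id in lanes: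
--             lane_to_phases[lane_id] = phase_binding
--
--     return lane_to_phases
-- ===== SOURCE B (Python) =====
-- def build_lane_phase_binding_mapping(movement_lanes, phase2movements):
--     num_phases = len(phase2movements)
--     lane_to_phases = {}
--     for movement_id, lanes in movement_lanes.items():
--         binding = [0] * num_phases
--         for phase_id, movements in phase2movements.items():
--             if movement_id in movements:
--                 binding[phase_id] = 1
--         for lane_id in lanes:
--             lane_to_phases[lane_id] = binding
--     return lane_to_phases
-- ===== Notes on version B (the rewrite author's own statement) =====
-- stated objective: simpler
-- what changed: B drops A's inverted-index pass (the movement_to_phases dict built over all phases' movement lists) and instead, per movement, scans phase2movements.items() directly and sets binding[phase_id] for each phase that lists the movement; Pre_ excludes inputs where a referenced phase id is outside list-index range, on which both implementations raise IndexError.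
import Mathlib
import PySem

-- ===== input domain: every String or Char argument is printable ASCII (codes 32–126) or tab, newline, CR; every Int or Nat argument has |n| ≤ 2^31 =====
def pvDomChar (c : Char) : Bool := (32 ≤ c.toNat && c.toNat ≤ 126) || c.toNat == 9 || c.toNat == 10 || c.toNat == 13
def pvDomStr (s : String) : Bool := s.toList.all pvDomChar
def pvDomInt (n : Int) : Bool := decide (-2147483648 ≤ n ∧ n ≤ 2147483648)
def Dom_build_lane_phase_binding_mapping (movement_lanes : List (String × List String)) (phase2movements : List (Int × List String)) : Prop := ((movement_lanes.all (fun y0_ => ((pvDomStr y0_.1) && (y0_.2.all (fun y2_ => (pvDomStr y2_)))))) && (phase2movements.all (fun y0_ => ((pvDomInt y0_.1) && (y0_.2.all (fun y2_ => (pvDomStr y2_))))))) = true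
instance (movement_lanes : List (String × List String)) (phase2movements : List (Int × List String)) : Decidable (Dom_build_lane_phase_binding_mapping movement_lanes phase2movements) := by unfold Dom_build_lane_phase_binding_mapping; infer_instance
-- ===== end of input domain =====

-- B drops A's inverted-index pass: per movement it scans phase2movements directly and
-- sets the bits of a fresh binding vector (simpler decomposition, same values; not faster).

-- ===== PORT A =====
def build_lane_phase_binding_mapping (movement_lanes : List (String × List String)) (phase2movements : List (Int × List String)) : List (String × List Int) :=
  let num_phases := phase2movements.length
  -- movement_to_phases: for phase_id, movements in phase2movements.items(): append phase_id
  let movement_to_phases : PySem.Dict String (List Int) :=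
    phase2movements.foldl (fun d pp =>
      pp.2.foldl (fun d movement_id =>
        (if d.contains movement_id then d else d.insert movement_id []).modify movement_id []
          (fun ps => ps ++ [pp.1])) d)
      PySem.Dict.empty
  let lane_to_phases : PySem.Dict String (List Int) :=
    movement_lanes.foldl (fun acc mp =>
      let binding0 := List.replicate num_phases (0 : Int)
      -- phase_binding[phase_id] = 1  (pySetD: total under Pre_, which guarantees InRange)
      let binding :=
        if movement_to_phases.contains mp.1 then
          (movement_to_phases.getD mp.1 []).foldl (fun b p => PySem.List.pySetD b p 1) binding0
        else binding0
      mp.2.foldl (fun acc lane => acc.insert lane binding) acc)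
      PySem.Dict.empty
  lane_to_phases.items

-- ===== PORT B =====
def build_lane_phase_binding_mapping_alt (movement_lanes : List (String × List String)) (phase2movements : List (Int × List String)) : List (String × List Int) :=
  let num_phases := phase2movements.length
  let lane_to_phases : PySem.Dict String (List Int) :=
    movement_lanes.foldl (fun acc mp =>
      -- binding[phase_id] = 1 whenever that phase's movement list contains this movement
      let binding :=
        phase2movements.foldl (fun b pp =>
          if pp.2.contains mp.1 then PySem.List.pySetD b pp.1 1 else b)
          (List.replicate num_phases (0 : Int))
      mp.2.foldl (fun acc lane => acc.insert lane binding) acc)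
      PySem.Dict.empty
  lane_to_phases.items

-- ===== PRECONDITION & SPEC =====
-- Pre_ excludes exactly the inputs where both programs raise IndexError: some movement listed
-- in movement_lanes belongs (via phase2movements) to a phase id outside [-num_phases, num_phases).
def Pre_build_lane_phase_binding_mapping (movement_lanes : List (String × List String)) (phase2movements : List (Int × List String)) : Prop :=
  ∀ mp ∈ movement_lanes, ∀ pp ∈ phase2movements, mp.1 ∈ pp.2 →
    -(phase2movements.length : Int) ≤ pp.1 ∧ pp.1 < (phase2movements.length : Int)
instance (movement_lanes : List (String × List String)) (phase2movements : List (Int × List String)) : Decidable (Pre_build_lane_phase_binding_mapping movement_lanes phase2movements) := by unfold Pre_build_lane_phase_binding_mapping; infer_instance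

def pvWitness_build_lane_phase_binding_mapping : (List (String × List String)) × (List (Int × List String)) :=
  ([("m1", ["l0", "l1"]), ("m2", ["l2"])], [(0, ["m1"]), (1, ["m2", "m1"])])

def Spec_build_lane_phase_binding_mapping (movement_lanes : List (String × List String)) (phase2movements : List (Int × List String)) (out : List (String × List Int)) : Prop := out = build_lane_phase_binding_mapping_alt movement_lanes phase2movements
instance (movement_lanes : List (String × List String)) (phase2movements : List (Int × List String)) (out : List (String × List Int)) : Decidable (Spec_build_lane_phase_binding_mapping movement_lanes phase2movements out) := by unfold Spec_build_lane_phase_binding_mapping; infer_instance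

-- ===== CLAIM (what is proved, stated in full; the proofs are below) =====
def Claim_equal_build_lane_phase_binding_mapping : Prop := ∀ (movement_lanes : List (String × List String)) (phase2movements : List (Int × List String)), Dom_build_lane_phase_binding_mapping movement_lanes phase2movements → Pre_build_lane_phase_binding_mapping movement_lanes phase2movements → Spec_build_lane_phase_binding_mapping movement_lanes phase2movements (build_lane_phase_binding_mapping movement_lanes phase2movements)

-- ===== LEMMAS AND PROOFS =====

-- the inner loop of A's first pass, named for the lemmas below
def pvStepA (p : Int) (d : PySem.Dict String (List Int)) (movement_id : String) : PySem.Dict String (List Int) :=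
  (if d.contains movement_id then d else d.insert movement_id []).modify movement_id []
    (fun ps => ps ++ [p])

lemma pvStepA_getD (movs : List String) (p : Int) (d : PySem.Dict String (List Int)) (m : String) :
    (movs.foldl (pvStepA p) d).getD m [] = d.getD m [] ++ List.replicate (movs.count m) p := by
  induction movs generalizing d with
  | nil => simp
  | cons m' t ih =>
    simp only [List.foldl_cons, ih]
    by_cases h : m' = m
    · subst h
      have hd : (pvStepA p d m').getD m' [] = d.getD m' [] ++ [p] := by
        unfold pvStepA
        by_cases hc : d.contains m' = true
        · simp [hc, PySem.Dict.getD_modify_self]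
        · rw [if_neg (by simp [hc]), PySem.Dict.getD_modify_self, PySem.Dict.getD_insert_self,
              PySem.Dict.getD_of_not_contains _ _ (by simp [hc])]
      rw [hd, List.append_assoc]
      congr 1
      rw [List.count_cons_self, List.replicate_succ]
      rfl
    · have hne : m ≠ m' := fun hmm => h hmm.symm
      have hd : (pvStepA p d m').getD m [] = d.getD m [] := by
        unfold pvStepA
        rw [PySem.Dict.getD_modify]
        simp only [if_neg hne]
        by_cases hc : d.contains m' = true
        · simp [hc]
        · rw [if_neg (by simp [hc]), PySem.Dict.getD_insert]
          simp [hne]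
      rw [hd]
      simp [h]

-- A's whole first pass, looked up at m: the phase ids with multiplicity, in list order
lemma pvM2P_getD (l : List (Int × List String)) (d : PySem.Dict String (List Int)) (m : String) :
    (l.foldl (fun d pp => pp.2.foldl (pvStepA pp.1) d) d).getD m []
      = d.getD m [] ++ l.flatMap (fun pp => List.replicate (pp.2.count m) pp.1) := by
  induction l generalizing d with
  | nil => simp
  | cons pp t ih =>
    simp only [List.foldl_cons, ih, pvStepA_getD, List.flatMap_cons, List.append_assoc]

-- xs[p] = v for an in-range (possibly negative) Python index, as List.set at p % len
lemma pvSetD_mod (b : List Int) (p v : Int)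
    (h1 : -(b.length : Int) ≤ p) (h2 : p < (b.length : Int)) :
    PySem.List.pySetD b p v = b.set (PySem.Int.mod p (b.length : Int)).toNat v := by
  have hn : 0 < (b.length : Int) := by omega
  rw [PySem.Int.mod_eq_emod_of_pos hn]
  simp only [PySem.List.pySetD, PySem.List.pySet?, PySem.List.pyIdx?]
  by_cases hp : 0 ≤ p
  · rw [if_pos hp, if_pos h2]
    have : p % (b.length : Int) = p := Int.emod_eq_of_lt hp h2
    simp [this]
  · rw [if_neg hp, if_pos h1]
    have hmod : p % (b.length : Int) = p + b.length := by
      have h3 : (p + (b.length : Int)) % (b.length : Int) = p % (b.length : Int) := by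
        simp
      have h4 : (p + (b.length : Int)) % (b.length : Int) = p + (b.length : Int) :=
        Int.emod_eq_of_lt (by omega) (by omega)
      omega
    have : (p % (b.length : Int)).toNat = b.length - (-p).toNat := by omega
    simp [this]

lemma pvSetFold_getElem? (P : List Int) (b : List Int) (n : Nat) (hb : b.length = n)
    (hP : ∀ p ∈ P, -(n : Int) ≤ p ∧ p < (n : Int)) (j : Nat) :
    (P.foldl (fun b p => PySem.List.pySetD b p 1) b)[j]?
      = if P.any (fun p => (PySem.Int.mod p (n : Int)).toNat == j) then some 1 else b[j]? := by
  induction P generalizing b with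
  | nil => simp
  | cons p t ih =>
    have hp := hP p (List.mem_cons_self)
    have hmodlt : (PySem.Int.mod p (n : Int)).toNat < n := by
      have h0 : 0 < (n : Int) := by omega
      have := PySem.Int.mod_lt p h0
      have := PySem.Int.mod_nonneg p h0
      omega
    simp only [List.foldl_cons]
    rw [pvSetD_mod b p 1 (by omega) (by omega), hb]
    rw [ih _ (by rw [List.length_set]; exact hb) (fun q hq => hP q (List.mem_cons_of_mem _ hq))]
    simp only [List.any_cons]
    by_cases ht : t.any (fun q => (PySem.Int.mod q (n : Int)).toNat == j) = true
    · simp [ht]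
    · simp only [Bool.not_eq_true] at ht
      rw [List.getElem?_set]
      simp [ht, hb, hmodlt]

-- the guard `if movement_id in movement_to_phases` is redundant for the VALUE of the binding
lemma pvGuard_elim (d : PySem.Dict String (List Int)) (m : String) (b0 : List Int) :
    (if d.contains m then (d.getD m []).foldl (fun b p => PySem.List.pySetD b p 1) b0 else b0)
      = (d.getD m []).foldl (fun b p => PySem.List.pySetD b p 1) b0 := by
  by_cases hc : d.contains m = true
  · simp [hc]
  · rw [PySem.Dict.getD_of_not_contains _ _ (by simp [hc])]
    simp [hc]

-- B's guarded scan is the fold of pySetD over the phase ids whose phase lists the movement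
lemma pvFoldGuard (l : List (Int × List String)) (m : String) (b0 : List Int) :
    l.foldl (fun b pp => if pp.2.contains m then PySem.List.pySetD b pp.1 1 else b) b0
      = ((l.filter (fun pp => pp.2.contains m)).map Prod.fst).foldl
          (fun b p => PySem.List.pySetD b p 1) b0 := by
  induction l generalizing b0 with
  | nil => rfl
  | cons pp t ih =>
    simp only [List.foldl_cons, List.filter_cons]
    by_cases hc : pp.2.contains m = true
    · rw [if_pos hc, if_pos hc, List.map_cons, List.foldl_cons]
      exact ih _
    · rw [if_neg hc, if_neg hc]
      exact ih _

-- per-movement binding lists of A and B coincide under Pre_'s range condition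
lemma pvBinding_eq (p2m : List (Int × List String)) (m : String)
    (hpre : ∀ pp ∈ p2m, m ∈ pp.2 →
      -(p2m.length : Int) ≤ pp.1 ∧ pp.1 < (p2m.length : Int)) :
    (if (p2m.foldl (fun d pp => pp.2.foldl (fun d movement_id =>
            (if d.contains movement_id then d else d.insert movement_id []).modify movement_id []
              (fun ps => ps ++ [pp.1])) d) PySem.Dict.empty).contains m then
        ((p2m.foldl (fun d pp => pp.2.foldl (fun d movement_id =>
            (if d.contains movement_id then d else d.insert movement_id []).modify movement_id []
              (fun ps => ps ++ [pp.1])) d) PySem.Dict.empty).getD m []).foldl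
          (fun b p => PySem.List.pySetD b p 1) (List.replicate p2m.length (0 : Int))
      else List.replicate p2m.length (0 : Int))
    = p2m.foldl (fun b pp => if pp.2.contains m then PySem.List.pySetD b pp.1 1 else b)
        (List.replicate p2m.length (0 : Int)) := by
  rw [show (fun (d : PySem.Dict String (List Int)) (pp : Int × List String) =>
        pp.2.foldl (fun d movement_id =>
          (if d.contains movement_id then d else d.insert movement_id []).modify movement_id []
            (fun ps => ps ++ [pp.1])) d)
      = (fun (d : PySem.Dict String (List Int)) (pp : Int × List String) =>
          pp.2.foldl (pvStepA pp.1) d) from rfl]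
  set n := p2m.length with hn
  rw [pvGuard_elim, pvM2P_getD, pvFoldGuard]
  simp only [PySem.Dict.getD_empty, List.nil_append]
  set P := p2m.flatMap (fun pp => List.replicate (pp.2.count m) pp.1) with hPdef
  set Q := (p2m.filter (fun pp => pp.2.contains m)).map Prod.fst with hQdef
  have hmemP : ∀ p, p ∈ P ↔ ∃ pp ∈ p2m, m ∈ pp.2 ∧ p = pp.1 := by
    intro p
    simp only [hPdef, List.mem_flatMap, List.mem_replicate]
    constructor
    · rintro ⟨pp, hpp, hcnt, rfl⟩
      exact ⟨pp, hpp, List.count_pos_iff.mp (Nat.pos_of_ne_zero hcnt), rfl⟩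
    · rintro ⟨pp, hpp, hm, rfl⟩
      exact ⟨pp, hpp, (List.count_pos_iff.mpr hm).ne', rfl⟩
  have hmemQ : ∀ p, p ∈ Q ↔ ∃ pp ∈ p2m, m ∈ pp.2 ∧ p = pp.1 := by
    intro p
    simp only [hQdef, List.mem_map, List.mem_filter, List.contains_eq_mem, decide_eq_true_eq]
    constructor
    · rintro ⟨pp, ⟨hpp, hm⟩, rfl⟩
      exact ⟨pp, hpp, hm, rfl⟩
    · rintro ⟨pp, hpp, hm, rfl⟩
      exact ⟨pp, ⟨hpp, hm⟩, rfl⟩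
  have hPr : ∀ p ∈ P, -(n : Int) ≤ p ∧ p < (n : Int) := by
    intro p hp
    obtain ⟨pp, hpp, hm, rfl⟩ := (hmemP p).mp hp
    exact hpre pp hpp hm
  have hQr : ∀ p ∈ Q, -(n : Int) ≤ p ∧ p < (n : Int) := by
    intro p hp
    obtain ⟨pp, hpp, hm, rfl⟩ := (hmemQ p).mp hp
    exact hpre pp hpp hm
  apply List.ext_getElem?
  intro j
  rw [pvSetFold_getElem? P _ n (by simp) hPr j, pvSetFold_getElem? Q _ n (by simp) hQr j]
  have hany : P.any (fun p => (PySem.Int.mod p (n : Int)).toNat == j)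
      = Q.any (fun p => (PySem.Int.mod p (n : Int)).toNat == j) := by
    rw [Bool.eq_iff_iff]
    simp only [List.any_eq_true]
    constructor
    · rintro ⟨p, hp, hj⟩
      exact ⟨p, (hmemQ p).mpr ((hmemP p).mp hp), hj⟩
    · rintro ⟨p, hp, hj⟩
      exact ⟨p, (hmemP p).mpr ((hmemQ p).mp hp), hj⟩
  rw [hany]

-- ===== VERDICT (by name: the statement is the Claim_ definition above) =====
theorem build_lane_phase_binding_mapping_spec : Claim_equal_build_lane_phase_binding_mapping := by
  intro ml p2m _hdom hpre
  unfold Spec_build_lane_phase_binding_mapping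
  unfold build_lane_phase_binding_mapping build_lane_phase_binding_mapping_alt
  simp only []
  congr 1
  apply PySem.List.foldl_congr_mem
  intro acc mp hmp
  have h := pvBinding_eq p2m mp.1 (fun pp hpp hm => hpre mp hmp pp hpp hm)
  rw [h]
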